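-- pv_equiv track=rewrite | github.com/satunr/COVID-19 | Network Science/ScriptScalable/grid2.py | define_grids
-- ===== SOURCE A (Python) =====
-- def define_grids(bG, bound, width):
--
--     grid = {}
--     for k in bG.keys():
--
--         if bound[k] == 'bl':
--             grid[k] = [(bG[k][0][0], bG[k][0][1]), (bG[k][1][0] + width, bG[k][1][1] + width)]
--
--         elif bound[k] == 'b':
--             grid[k] = [(bG[k][0][0], bG[k][0][1] - width), (bG[k][1][0] + width, bG[k][1][1] + width)]
--
--         elif bound[k] == 'br':
--             grid[k] = [(bG[k][0][0], bG[k][0][1] - width), (bG[k][1][0] + width, bG[k][1][1])]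
--
--         elif bound[k] == 'l':
--             grid[k] = [(bG[k][0][0] - width, bG[k][0][1]), (bG[k][1][0] + width, bG[k][1][1] + width)]
--
--         elif bound[k] == '':
--             grid[k] = [(bG[k][0][0] - width, bG[k][0][1] - width), (bG[k][1][0] + width, bG[k][1][1] + width)]
--
--         elif bound[k] == 'r':
--             grid[k] = [(bG[k][0][0] - width, bG[k][0][1] - width), (bG[k][1][0] + width, bG[k][1][1])]
--
--         elif bound[k] == 'tl':
--             grid[k] = [(bG[k][0][0] - width, bG[k][0][1]), (bG[k][1][0], bG[k][1][1] + width)]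
--
--         elif bound[k] == 't':
--             grid[k] = [(bG[k][0][0] - width, bG[k][0][1] - width), (bG[k][1][0], bG[k][1][1] + width)]
--
--         elif bound[k] == 'tr':
--             grid[k] = [(bG[k][0][0] - width, bG[k][0][1] - width), (bG[k][1][0], bG[k][1][1])]
--
--     return grid
-- ===== SOURCE B (Python) =====
-- # Per-coordinate rewrite: each of the four box coordinates is derived independently
-- # from substring predicates of the boundary label (startswith/endswith), instead of
-- # enumerating the nine labels in a branch chain; return value only.
-- LABELS = ('bl', 'b', 'br', 'l', '', 'r', 'tl', 't', 'tr')
--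
--
-- def define_grids(bG, bound, width):
--     grid = {}
--     for k in bG:
--         lbl = bound[k]
--         if lbl in LABELS:
--             (x0, y0), (x1, y1) = bG[k][0], bG[k][1]
--             grid[k] = [(x0 - (0 if lbl.startswith('b') else width),
--                         y0 - (0 if lbl.endswith('l') else width)),
--                        (x1 + (0 if lbl.startswith('t') else width),
--                         y1 + (0 if lbl.endswith('r') else width))]
--     return grid
-- ===== Notes on version B (the rewrite author's own statement) =====
-- stated objective: alternative
-- what changed: Instead of enumerating the nine boundary labels in an if/elif chain with nine hard-coded boxes, B validates the label against the label set and derives each of the four box coordinates independently from substring predicates of the label (startswith('b')/('t'), endswith('l')/('r')).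
import Mathlib
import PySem

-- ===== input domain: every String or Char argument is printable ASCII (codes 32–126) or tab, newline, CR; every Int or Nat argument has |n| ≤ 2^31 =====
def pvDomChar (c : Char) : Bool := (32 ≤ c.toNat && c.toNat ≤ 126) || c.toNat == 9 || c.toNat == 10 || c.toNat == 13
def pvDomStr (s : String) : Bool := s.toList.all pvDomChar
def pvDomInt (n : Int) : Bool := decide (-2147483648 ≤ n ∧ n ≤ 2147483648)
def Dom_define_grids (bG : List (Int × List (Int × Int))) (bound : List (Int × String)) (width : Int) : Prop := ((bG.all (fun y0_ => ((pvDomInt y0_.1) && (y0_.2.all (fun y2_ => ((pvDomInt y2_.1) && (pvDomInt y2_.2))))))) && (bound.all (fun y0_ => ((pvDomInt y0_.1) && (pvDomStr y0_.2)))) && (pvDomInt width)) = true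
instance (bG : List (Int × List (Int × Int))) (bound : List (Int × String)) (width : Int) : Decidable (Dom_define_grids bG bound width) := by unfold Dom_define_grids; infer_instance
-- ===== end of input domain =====

-- B derives each of the four box coordinates independently from substring predicates of the
-- boundary label instead of A's nine-branch case analysis; return values only (no mutation).

-- ===== PORT A =====
-- loop body of A: read bound[k], then the nine-branch chain (box accesses outside Pre_ take a default, never reached inside Pre_)
def dgStepA (bGd : PySem.Dict Int (List (Int × Int))) (bd : PySem.Dict Int String) (width : Int)
    (grid : PySem.Dict Int (List (Int × Int))) (k : Int) : PySem.Dict Int (List (Int × Int)) :=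
  match bd.get? k with
  | none => grid            -- bound[k] raises KeyError in Python: excluded by Pre_
  | some lbl =>
    let box := bGd.getD k []
    let p := PySem.List.pyGetD box 0 (0, 0)   -- bG[k][0] (IndexError outside Pre_)
    let q := PySem.List.pyGetD box 1 (0, 0)   -- bG[k][1]
    if lbl = "bl" then grid.insert k [(p.1, p.2), (q.1 + width, q.2 + width)]
    else if lbl = "b" then grid.insert k [(p.1, p.2 - width), (q.1 + width, q.2 + width)]
    else if lbl = "br" then grid.insert k [(p.1, p.2 - width), (q.1 + width, q.2)]
    else if lbl = "l" then grid.insert k [(p.1 - width, p.2), (q.1 + width, q.2 + width)]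
    else if lbl = "" then grid.insert k [(p.1 - width, p.2 - width), (q.1 + width, q.2 + width)]
    else if lbl = "r" then grid.insert k [(p.1 - width, p.2 - width), (q.1 + width, q.2)]
    else if lbl = "tl" then grid.insert k [(p.1 - width, p.2), (q.1, q.2 + width)]
    else if lbl = "t" then grid.insert k [(p.1 - width, p.2 - width), (q.1, q.2 + width)]
    else if lbl = "tr" then grid.insert k [(p.1 - width, p.2 - width), (q.1, q.2)]
    else grid

def define_grids (bG : List (Int × List (Int × Int))) (bound : List (Int × String)) (width : Int) : List (Int × List (Int × Int)) :=
  let bGd := PySem.Dict.ofList bG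
  let bd := PySem.Dict.ofList bound
  ((bGd.keys).foldl (dgStepA bGd bd width) PySem.Dict.empty).items

-- ===== PORT B =====
-- loop body of B: validity check 'lbl in LABELS', then each coordinate from startswith/endswith
def dgStepB (bGd : PySem.Dict Int (List (Int × Int))) (bd : PySem.Dict Int String) (width : Int)
    (grid : PySem.Dict Int (List (Int × Int))) (k : Int) : PySem.Dict Int (List (Int × Int)) :=
  match bd.get? k with
  | none => grid            -- bound[k] raises KeyError in Python: excluded by Pre_
  | some lbl =>
    if lbl ∈ (["bl", "b", "br", "l", "", "r", "tl", "t", "tr"] : List String) then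
      let box := bGd.getD k []
      let p := PySem.List.pyGetD box 0 (0, 0)
      let q := PySem.List.pyGetD box 1 (0, 0)
      grid.insert k
        [(p.1 - (if PySem.Str.startswith lbl "b" then 0 else width),
          p.2 - (if PySem.Str.endswith lbl "l" then 0 else width)),
         (q.1 + (if PySem.Str.startswith lbl "t" then 0 else width),
          q.2 + (if PySem.Str.endswith lbl "r" then 0 else width))]
    else grid

def define_grids_alt (bG : List (Int × List (Int × Int))) (bound : List (Int × String)) (width : Int) : List (Int × List (Int × Int)) :=
  let bGd := PySem.Dict.ofList bG
  let bd := PySem.Dict.ofList bound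
  ((bGd.keys).foldl (dgStepB bGd bd width) PySem.Dict.empty).items

-- ===== PRECONDITION & SPEC =====
-- Pre_ excludes exactly the inputs where the Python A raises: a bG key missing from bound (KeyError),
-- or a box with fewer than 2 corners under one of the nine recognised labels (IndexError).
def Pre_define_grids (bG : List (Int × List (Int × Int))) (bound : List (Int × String)) (width : Int) : Prop :=
  ∀ p ∈ (PySem.Dict.ofList bG).items,
    (PySem.Dict.ofList bound).contains p.1 = true ∧
    ((PySem.Dict.ofList bound).getD p.1 "?" ∈ (["bl", "b", "br", "l", "", "r", "tl", "t", "tr"] : List String) → 2 ≤ p.2.length)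
instance (bG : List (Int × List (Int × Int))) (bound : List (Int × String)) (width : Int) : Decidable (Pre_define_grids bG bound width) := by unfold Pre_define_grids; infer_instance

def pvWitness_define_grids : (List (Int × List (Int × Int))) × (List (Int × String)) × Int :=
  ([(0, [(0, 0), (1, 1)]), (1, [(2, 2), (3, 3)])], [(0, "bl"), (1, "x")], 1)

def Spec_define_grids (bG : List (Int × List (Int × Int))) (bound : List (Int × String)) (width : Int) (out : List (Int × List (Int × Int))) : Prop := out = define_grids_alt bG bound width
instance (bG : List (Int × List (Int × Int))) (bound : List (Int × String)) (width : Int) (out : List (Int × List (Int × Int))) : Decidable (Spec_define_grids bG bound width out) := by unfold Spec_define_grids; infer_instance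

-- ===== CLAIM =====
def Claim_equal_define_grids : Prop := ∀ (bG : List (Int × List (Int × Int))) (bound : List (Int × String)) (width : Int), Dom_define_grids bG bound width → Pre_define_grids bG bound width → Spec_define_grids bG bound width (define_grids bG bound width)

-- ===== LEMMAS AND PROOFS =====

-- the two loop bodies agree pointwise
lemma dgStep_eq (bGd : PySem.Dict Int (List (Int × Int))) (bd : PySem.Dict Int String)
    (width : Int) (grid : PySem.Dict Int (List (Int × Int))) (k : Int) :
    dgStepA bGd bd width grid k = dgStepB bGd bd width grid k := by
  unfold dgStepA dgStepB
  cases hb : bd.get? k with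
  | none => rfl
  | some lbl =>
    by_cases h1 : lbl = "bl"
    · subst h1; norm_num [show PySem.Chars.startswith "bl".toList "b".toList = true from by decide,
        show PySem.Chars.endswith "bl".toList "l".toList = true from by decide,
        show PySem.Chars.startswith "bl".toList "t".toList = false from by decide,
        show PySem.Chars.endswith "bl".toList "r".toList = false from by decide,
        sub_eq_add_neg]
    by_cases h2 : lbl = "b"
    · subst h2; norm_num [show ("b":String) ≠ "bl" from by decide,
        show PySem.Chars.startswith "b".toList "b".toList = true from by decide,
        show PySem.Chars.endswith "b".toList "l".toList = false from by decide,
        show PySem.Chars.startswith "b".toList "t".toList = false from by decide,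
        show PySem.Chars.endswith "b".toList "r".toList = false from by decide,
        sub_eq_add_neg]
    by_cases h3 : lbl = "br"
    · subst h3; norm_num [show ("br":String) ≠ "bl" from by decide,
        show ("br":String) ≠ "b" from by decide,
        show PySem.Chars.startswith "br".toList "b".toList = true from by decide,
        show PySem.Chars.endswith "br".toList "l".toList = false from by decide,
        show PySem.Chars.startswith "br".toList "t".toList = false from by decide,
        show PySem.Chars.endswith "br".toList "r".toList = true from by decide,
        sub_eq_add_neg]
    by_cases h4 : lbl = "l"
    · subst h4; norm_num [show ("l":String) ≠ "bl" from by decide,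
        show ("l":String) ≠ "b" from by decide,
        show ("l":String) ≠ "br" from by decide,
        show PySem.Chars.startswith "l".toList "b".toList = false from by decide,
        show PySem.Chars.endswith "l".toList "l".toList = true from by decide,
        show PySem.Chars.startswith "l".toList "t".toList = false from by decide,
        show PySem.Chars.endswith "l".toList "r".toList = false from by decide,
        sub_eq_add_neg]
    by_cases h5 : lbl = ""
    · subst h5; norm_num [show ("":String) ≠ "bl" from by decide,
        show ("":String) ≠ "b" from by decide,
        show ("":String) ≠ "br" from by decide,
        show ("":String) ≠ "l" from by decide,
        show PySem.Chars.startswith ([] : List Char) "b".toList = false from by decide,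
        show PySem.Chars.endswith ([] : List Char) "l".toList = false from by decide,
        show PySem.Chars.startswith ([] : List Char) "t".toList = false from by decide,
        show PySem.Chars.endswith ([] : List Char) "r".toList = false from by decide,
        sub_eq_add_neg]
    by_cases h6 : lbl = "r"
    · subst h6; norm_num [show ("r":String) ≠ "bl" from by decide,
        show ("r":String) ≠ "b" from by decide,
        show ("r":String) ≠ "br" from by decide,
        show ("r":String) ≠ "l" from by decide,
        show ("r":String) ≠ "" from by decide,
        show PySem.Chars.startswith "r".toList "b".toList = false from by decide,
        show PySem.Chars.endswith "r".toList "l".toList = false from by decide,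
        show PySem.Chars.startswith "r".toList "t".toList = false from by decide,
        show PySem.Chars.endswith "r".toList "r".toList = true from by decide,
        sub_eq_add_neg]
    by_cases h7 : lbl = "tl"
    · subst h7; norm_num [show ("tl":String) ≠ "bl" from by decide,
        show ("tl":String) ≠ "b" from by decide,
        show ("tl":String) ≠ "br" from by decide,
        show ("tl":String) ≠ "l" from by decide,
        show ("tl":String) ≠ "" from by decide,
        show ("tl":String) ≠ "r" from by decide,
        show PySem.Chars.startswith "tl".toList "b".toList = false from by decide,
        show PySem.Chars.endswith "tl".toList "l".toList = true from by decide,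
        show PySem.Chars.startswith "tl".toList "t".toList = true from by decide,
        show PySem.Chars.endswith "tl".toList "r".toList = false from by decide,
        sub_eq_add_neg]
    by_cases h8 : lbl = "t"
    · subst h8; norm_num [show ("t":String) ≠ "bl" from by decide,
        show ("t":String) ≠ "b" from by decide,
        show ("t":String) ≠ "br" from by decide,
        show ("t":String) ≠ "l" from by decide,
        show ("t":String) ≠ "" from by decide,
        show ("t":String) ≠ "r" from by decide,
        show ("t":String) ≠ "tl" from by decide,
        show PySem.Chars.startswith "t".toList "b".toList = false from by decide,
        show PySem.Chars.endswith "t".toList "l".toList = false from by decide,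
        show PySem.Chars.startswith "t".toList "t".toList = true from by decide,
        show PySem.Chars.endswith "t".toList "r".toList = false from by decide,
        sub_eq_add_neg]
    by_cases h9 : lbl = "tr"
    · subst h9; norm_num [show ("tr":String) ≠ "bl" from by decide,
        show ("tr":String) ≠ "b" from by decide,
        show ("tr":String) ≠ "br" from by decide,
        show ("tr":String) ≠ "l" from by decide,
        show ("tr":String) ≠ "" from by decide,
        show ("tr":String) ≠ "r" from by decide,
        show ("tr":String) ≠ "tl" from by decide,
        show ("tr":String) ≠ "t" from by decide,
        show PySem.Chars.startswith "tr".toList "b".toList = false from by decide,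
        show PySem.Chars.endswith "tr".toList "l".toList = false from by decide,
        show PySem.Chars.startswith "tr".toList "t".toList = true from by decide,
        show PySem.Chars.endswith "tr".toList "r".toList = true from by decide,
        sub_eq_add_neg]
    simp [h1, h2, h3, h4, h5, h6, h7, h8, h9]

-- ===== VERDICT =====
theorem define_grids_spec : Claim_equal_define_grids := by
  intro bG bound width _ _
  unfold Spec_define_grids define_grids define_grids_alt
  change (List.foldl (dgStepA (PySem.Dict.ofList bG) (PySem.Dict.ofList bound) width) PySem.Dict.empty (PySem.Dict.ofList bG).keys).items
    = (List.foldl (dgStepB (PySem.Dict.ofList bG) (PySem.Dict.ofList bound) width) PySem.Dict.empty (PySem.Dict.ofList bG).keys).items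
  rw [show dgStepA (PySem.Dict.ofList bG) (PySem.Dict.ofList bound) width
        = dgStepB (PySem.Dict.ofList bG) (PySem.Dict.ofList bound) width
      from funext fun grid => funext fun k => dgStep_eq _ _ _ _ _]
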